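-- pv_equiv track=rewrite | github.com/CMDann/yolo-studio | yolo_studio/ui/tabs/discover_tab.py | _pick_weight_file
-- ===== SOURCE A (Python) =====
-- from typing import Any, Iterable, Mapping
--
-- def _pick_weight_file(files: Iterable[str]) -> str | None:
--     """Select preferred model weight file from repository file list.
--
--     Args:
--         files: Repository file paths.
--
--     Returns:
--         str | None: Best candidate file path.
--     """
--
--     priority_ext = [".pt", ".onnx", ".engine", ".tflite"]
--     normalized = [str(path) for path in files]
--
--     for ext in priority_ext:
--         candidates = [path for path in normalized if path.lower().endswith(ext)]
--         if candidates:
--             # Prefer top-level files first.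
--             candidates.sort(key=lambda path: (path.count("/"), len(path)))
--             return candidates[0]
--
--     return None
-- ===== SOURCE B (Python) =====
-- def _pick_weight_file(files):
--     """Select preferred model weight file in one pass, tracking the best
--     (extension rank, slash count, length) key instead of sorting per extension."""
--     priority_ext = [".pt", ".onnx", ".engine", ".tflite"]
--     best = None
--     best_key = None
--     for path in files:
--         path = str(path)
--         low = path.lower()
--         for rank, ext in enumerate(priority_ext):
--             if low.endswith(ext):
--                 key = (rank, path.count("/"), len(path))
--                 if best_key is None or key < best_key:
--                     best, best_key = path, key
--                 break
--     return best
-- ===== Notes on version B (the rewrite author's own statement) =====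
-- stated objective: simpler
-- what changed: Replaces the per-extension filter + stable sort + take-first loop by a single pass over the files that tracks the minimum (extension rank, slash count, length) key, keeping the first file on ties.
import Mathlib
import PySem

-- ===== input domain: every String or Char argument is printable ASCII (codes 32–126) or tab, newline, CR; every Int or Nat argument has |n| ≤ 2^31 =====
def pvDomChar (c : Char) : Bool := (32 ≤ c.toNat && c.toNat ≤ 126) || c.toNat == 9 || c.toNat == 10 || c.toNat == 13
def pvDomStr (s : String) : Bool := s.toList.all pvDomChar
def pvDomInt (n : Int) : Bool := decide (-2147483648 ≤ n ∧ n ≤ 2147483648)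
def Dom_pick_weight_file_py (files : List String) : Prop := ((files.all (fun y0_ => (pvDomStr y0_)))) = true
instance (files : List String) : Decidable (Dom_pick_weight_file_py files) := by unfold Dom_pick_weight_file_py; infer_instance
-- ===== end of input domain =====

-- B replaces A's per-extension filter + stable sort + take-first by a single pass
-- tracking the minimum (extension rank, slash count, length) key (objective: simpler).

-- ===== PORT A =====
-- candidates = [path for path in normalized if path.lower().endswith(ext)]
def pvCand (normalized : List String) (ext : String) : List String :=
  normalized.filter (fun p => PySem.Str.endswith (PySem.Str.lower p) ext)

-- the 'for ext in priority_ext' loop with its early return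
def pvPickLoop (normalized : List String) : List String → Option String
  | [] => none
  | ext :: rest =>
    let candidates := pvCand normalized ext
    if candidates = [] then pvPickLoop normalized rest
    else (PySem.List.sorted2 candidates
            (fun p => PySem.Str.count p "/") (fun p => PySem.Str.len p) false).head?

def pick_weight_file_py (files : List String) : Option String :=
  let normalized := files.map (fun p => p)   -- str(path) is the identity on str
  pvPickLoop normalized [".pt", ".onnx", ".engine", ".tflite"]

-- ===== PORT B =====
-- inner 'for rank, ext in enumerate(priority_ext): … break' loop
def pvRank (low : String) : List String → Nat → Option Nat
  | [], _ => none
  | ext :: rest, r => if PySem.Str.endswith low ext then some r else pvRank low rest (r + 1)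

-- Python tuple comparison key < best_key (lexicographic on Nat triples)
def pvKeyLt (a b : Nat × Nat × Int) : Bool :=
  decide (a.1 < b.1) ||
    (a.1 == b.1 && (decide (a.2.1 < b.2.1) || (a.2.1 == b.2.1 && decide (a.2.2 < b.2.2))))

-- one iteration of the 'for path in files' loop (state: best with its key)
def pvStep (best : Option (String × (Nat × Nat × Int))) (path : String) :
    Option (String × (Nat × Nat × Int)) :=
  match pvRank (PySem.Str.lower path) [".pt", ".onnx", ".engine", ".tflite"] 0 with
  | none => best
  | some r =>
    let key := (r, PySem.Str.count path "/", PySem.Str.len path)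
    match best with
    | none => some (path, key)
    | some (_, bk) => if pvKeyLt key bk then some (path, key) else best

def pick_weight_file_py_alt (files : List String) : Option String :=
  (files.foldl pvStep none).map Prod.fst

-- ===== PRECONDITION & SPEC =====
def Spec_pick_weight_file_py (files : List String) (out : Option String) : Prop := out = pick_weight_file_py_alt files
instance (files : List String) (out : Option String) : Decidable (Spec_pick_weight_file_py files out) := by unfold Spec_pick_weight_file_py; infer_instance

-- ===== CLAIM (what is proved, stated in full; the proofs are below) =====
def Claim_equal_pick_weight_file_py : Prop := ∀ (files : List String), Dom_pick_weight_file_py files → Spec_pick_weight_file_py files (pick_weight_file_py files)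

-- ===== LEMMAS AND PROOFS =====

-- generic first-minimum fold (both ports' loops reduce to this shape)
def pvFM {κ : Type} (key : String → Option κ) (lt : κ → κ → Bool)
    (best : Option (String × κ)) (p : String) : Option (String × κ) :=
  match key p with
  | none => best
  | some k =>
    match best with
    | none => some (p, k)
    | some (_, bk) => if lt k bk then some (p, k) else best

-- "q (with key kq) is the first key-minimal matching element of files"
def pvIsFirstMin {κ : Type} (key : String → Option κ) (lt : κ → κ → Bool)
    (files : List String) (q : String) (kq : κ) : Prop :=
  ∃ l1 l2, files = l1 ++ q :: l2 ∧ key q = some kq ∧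
    (∀ p ∈ l1, ∀ kp, key p = some kp → lt kq kp = true) ∧
    (∀ p ∈ l2, ∀ kp, key p = some kp → lt kp kq = false)

-- fold with a some-accumulator
theorem pvFM_foldl_some {κ : Type} (key : String → Option κ) (lt : κ → κ → Bool)
    (Hasym : ∀ a b, lt a b = true → lt b a = false)
    (Htr : ∀ a b c, lt a b = true → lt c b = false → lt a c = true) :
    ∀ (t : List String) (q : String) (kq : κ),
      (t.foldl (pvFM key lt) (some (q, kq)) = some (q, kq) ∧
        ∀ p ∈ t, ∀ kp, key p = some kp → lt kp kq = false) ∨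
      (∃ q' k', t.foldl (pvFM key lt) (some (q, kq)) = some (q', k') ∧
        lt k' kq = true ∧ pvIsFirstMin key lt t q' k') := by
  intro t
  unfold pvIsFirstMin
  induction t with
  | nil => intro q kq; left; exact ⟨rfl, by simp⟩
  | cons x t' ih =>
    intro q kq
    by_cases hx : ∃ kx, key x = some kx
    · obtain ⟨kx, hkx⟩ := hx
      by_cases hlt : lt kx kq = true
      · -- accumulator replaced by (x, kx)
        have hstep : pvFM key lt (some (q, kq)) x = some (x, kx) := by
          simp [pvFM, hkx, hlt]
        rcases ih x kx with ⟨heq, hall⟩ | ⟨q', k', heq, hk', hmin⟩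
        · right
          refine ⟨x, kx, ?_, hlt, [], t', rfl, hkx, by simp, hall⟩
          simpa [List.foldl_cons, hstep] using heq
        · right
          obtain ⟨l1, l2, hdec, hkq', hbefore, hafter⟩ := hmin
          refine ⟨q', k', ?_, Htr k' kx kq hk' (Hasym kx kq hlt), x :: l1, l2, by simp [hdec], hkq', ?_, hafter⟩
          · simpa [List.foldl_cons, hstep] using heq
          · intro p hp kp hkp
            rcases List.mem_cons.mp hp with hp | hp
            · subst hp; rw [hkp] at hkx; injection hkx with e; subst e; exact hk'
            · exact hbefore p hp kp hkp
      · -- accumulator kept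
        have hstep : pvFM key lt (some (q, kq)) x = some (q, kq) := by
          simp [pvFM, hkx, hlt]
        rcases ih q kq with ⟨heq, hall⟩ | ⟨q', k', heq, hk', hmin⟩
        · left
          constructor
          · simpa [List.foldl_cons, hstep] using heq
          · intro p hp kp hkp
            rcases List.mem_cons.mp hp with hp | hp
            · subst hp; rw [hkp] at hkx; injection hkx with e; subst e
              exact Bool.eq_false_iff.mpr hlt
            · exact hall p hp kp hkp
        · right
          obtain ⟨l1, l2, hdec, hkq', hbefore, hafter⟩ := hmin
          refine ⟨q', k', ?_, hk', x :: l1, l2, by simp [hdec], hkq', ?_, hafter⟩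
          · simpa [List.foldl_cons, hstep] using heq
          · intro p hp kp hkp
            rcases List.mem_cons.mp hp with hp | hp
            · subst hp; rw [hkp] at hkx; injection hkx with e; subst e
              exact Htr k' kq kp hk' (Bool.eq_false_iff.mpr hlt)
            · exact hbefore p hp kp hkp
    · -- key x = none
      push Not at hx
      have hkx : key x = none := by
        cases h : key x with
        | none => rfl
        | some k => exact absurd h (hx k)
      have hstep : pvFM key lt (some (q, kq)) x = some (q, kq) := by simp [pvFM, hkx]
      rcases ih q kq with ⟨heq, hall⟩ | ⟨q', k', heq, hk', hmin⟩
      · left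
        constructor
        · simpa [List.foldl_cons, hstep] using heq
        · intro p hp kp hkp
          rcases List.mem_cons.mp hp with hp | hp
          · subst hp; rw [hkp] at hkx; cases hkx
          · exact hall p hp kp hkp
      · right
        obtain ⟨l1, l2, hdec, hkq', hbefore, hafter⟩ := hmin
        refine ⟨q', k', ?_, hk', x :: l1, l2, by simp [hdec], hkq', ?_, hafter⟩
        · simpa [List.foldl_cons, hstep] using heq
        · intro p hp kp hkp
          rcases List.mem_cons.mp hp with hp | hp
          · subst hp; rw [hkp] at hkx; cases hkx
          · exact hbefore p hp kp hkp

-- fold from none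
theorem pvFM_foldl_none {κ : Type} (key : String → Option κ) (lt : κ → κ → Bool)
    (Hasym : ∀ a b, lt a b = true → lt b a = false)
    (Htr : ∀ a b c, lt a b = true → lt c b = false → lt a c = true) :
    ∀ (t : List String),
      (t.foldl (pvFM key lt) none = none ∧ ∀ p ∈ t, key p = none) ∨
      (∃ q k, t.foldl (pvFM key lt) none = some (q, k) ∧ pvIsFirstMin key lt t q k) := by
  intro t
  unfold pvIsFirstMin
  induction t with
  | nil => left; exact ⟨rfl, by simp⟩
  | cons x t' ih =>
    cases hkx : key x with
    | none =>
      have hstep : pvFM key lt none x = none := by simp [pvFM, hkx]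
      rcases ih with ⟨heq, hall⟩ | ⟨q, k, heq, l1, l2, hdec, hkq, hbefore, hafter⟩
      · left
        refine ⟨by simpa [List.foldl_cons, hstep] using heq, ?_⟩
        intro p hp
        rcases List.mem_cons.mp hp with hp | hp
        · subst hp; exact hkx
        · exact hall p hp
      · right
        refine ⟨q, k, by simpa [List.foldl_cons, hstep] using heq,
          x :: l1, l2, by simp [hdec], hkq, ?_, hafter⟩
        intro p hp kp hkp
        rcases List.mem_cons.mp hp with hp | hp
        · subst hp; rw [hkp] at hkx; cases hkx
        · exact hbefore p hp kp hkp
    | some kx =>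
      have hstep : pvFM key lt none x = some (x, kx) := by simp [pvFM, hkx]
      have hmain := pvFM_foldl_some key lt Hasym Htr t' x kx
      rcases hmain with ⟨heq, hall⟩ | ⟨q', k', heq, hk', hmin⟩
      · right
        exact ⟨x, kx, by simpa [List.foldl_cons, hstep] using heq,
          [], t', rfl, hkx, by simp, hall⟩
      · right
        obtain ⟨l1, l2, hdec, hkq', hbefore, hafter⟩ := hmin
        refine ⟨q', k', by simpa [List.foldl_cons, hstep] using heq,
          x :: l1, l2, by simp [hdec], hkq', ?_, hafter⟩
        intro p hp kp hkp
        rcases List.mem_cons.mp hp with hp | hp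
        · subst hp; rw [hkp] at hkx; injection hkx with e; subst e; exact hk'
        · exact hbefore p hp kp hkp

-- the first minimum is unique as a returned value
theorem pvIsFirstMin_unique {κ : Type} (key : String → Option κ) (lt : κ → κ → Bool)
    (files : List String) (q1 q2 : String) (k1 k2 : κ)
    (h1 : pvIsFirstMin key lt files q1 k1) (h2 : pvIsFirstMin key lt files q2 k2) :
    q1 = q2 := by
  obtain ⟨l1, l2, hd1, hk1, hb1, ha1⟩ := h1
  obtain ⟨m1, m2, hd2, hk2, hb2, ha2⟩ := h2
  have h : l1 ++ q1 :: l2 = m1 ++ q2 :: m2 := by rw [← hd1, ← hd2]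
  rcases List.append_eq_append_iff.mp h with ⟨as, hm1, hl2⟩ | ⟨bs, hl1, hm2⟩
  · cases as with
    | nil =>
      simp at hl2
      exact hl2.1
    | cons a as' =>
      -- q1 = a ∈ m1 and q2 ∈ l2 : contradiction
      have hq1 : q1 = a ∧ l2 = as' ++ q2 :: m2 := by
        have := hl2
        simp at this
        exact this
      obtain ⟨hq1a, hl2'⟩ := hq1
      have hq1m : q1 ∈ m1 := by rw [hm1, hq1a]; simp
      have hq2l : q2 ∈ l2 := by rw [hl2']; simp
      have c1 : lt k2 k1 = true := hb2 q1 hq1m k1 hk1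
      have c2 : lt k2 k1 = false := ha1 q2 hq2l k2 hk2
      rw [c1] at c2; cases c2
  · cases bs with
    | nil =>
      simp at hm2
      exact hm2.1.symm
    | cons b bs' =>
      have hq2 : q2 = b ∧ m2 = bs' ++ q1 :: l2 := by
        have := hm2
        simp at this
        exact this
      obtain ⟨hq2b, hm2'⟩ := hq2
      have hq2m : q2 ∈ l1 := by rw [hl1, hq2b]; simp
      have hq1l : q1 ∈ m2 := by rw [hm2']; simp
      have c1 : lt k1 k2 = true := hb1 q2 hq2m k2 hk2
      have c2 : lt k1 k2 = false := ha2 q1 hq1l k1 hk1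
      rw [c1] at c2; cases c2

-- B's step is the generic fold step
def pvKeyB (p : String) : Option (Nat × Nat × Int) :=
  (pvRank (PySem.Str.lower p) [".pt", ".onnx", ".engine", ".tflite"] 0).map
    (fun r => (r, PySem.Str.count p "/", PySem.Str.len p))

theorem pvStep_eq (b : Option (String × (Nat × Nat × Int))) (p : String) :
    pvStep b p = pvFM pvKeyB pvKeyLt b p := by
  cases h : pvRank (PySem.Str.lower p) [".pt", ".onnx", ".engine", ".tflite"] 0 <;>
    cases b <;> simp [pvStep, pvFM, pvKeyB, h]

-- lexicographic pair order used by sorted2's insertion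
def pvKeyLt2 (a b : Nat × Int) : Bool :=
  decide (a.1 < b.1) || (!decide (b.1 < a.1) && decide (a.2 < b.2))

def pvK2v (p : String) : Nat × Int := (PySem.Str.count p "/", PySem.Str.len p)

def pvKey2 (p : String) : Option (Nat × Int) :=
  some (PySem.Str.count p "/", PySem.Str.len p)

def pvBef (x y : String) : Bool := pvKeyLt2 (pvK2v x) (pvK2v y)

theorem pvFoldl_insertBy_head (l : List String) : ∀ acc : List String,
    (l.foldl (fun a x => PySem.List.insertBy pvBef x a) acc).head? =
      (l.foldl (pvFM pvKey2 pvKeyLt2) (acc.head?.map (fun h => (h, pvK2v h)))).map Prod.fst := by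
  induction l with
  | nil => intro acc; cases acc <;> rfl
  | cons p t ih =>
    intro acc
    rw [List.foldl_cons, List.foldl_cons, ih]
    have hinit : (PySem.List.insertBy pvBef p acc).head?.map (fun h => (h, pvK2v h)) =
        pvFM pvKey2 pvKeyLt2 (acc.head?.map (fun h => (h, pvK2v h))) p := by
      cases acc with
      | nil => rfl
      | cons h t' =>
        have hins : PySem.List.insertBy pvBef p (h :: t') =
            if pvBef p h then p :: h :: t' else h :: PySem.List.insertBy pvBef p t' := rfl
        rw [hins]
        by_cases hb : pvBef p h = true
        · rw [if_pos hb]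
          show some (p, pvK2v p) =
            if pvKeyLt2 (PySem.Str.count p "/", PySem.Str.len p) (pvK2v h)
            then some (p, (PySem.Str.count p "/", PySem.Str.len p)) else some (h, pvK2v h)
          have hb' : pvKeyLt2 (PySem.Str.count p "/", PySem.Str.len p) (pvK2v h) = true := hb
          rw [if_pos hb']
          rfl
        · rw [if_neg hb]
          show some (h, pvK2v h) =
            if pvKeyLt2 (PySem.Str.count p "/", PySem.Str.len p) (pvK2v h)
            then some (p, (PySem.Str.count p "/", PySem.Str.len p)) else some (h, pvK2v h)
          rw [if_neg (by exact hb)]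
    rw [hinit]

theorem pvHead_sorted2 (cand : List String) :
    (PySem.List.sorted2 cand (fun p => PySem.Str.count p "/") (fun p => PySem.Str.len p)
        false).head? =
    (cand.foldl (pvFM pvKey2 pvKeyLt2) none).map Prod.fst := by
  have h := pvFoldl_insertBy_head cand []
  simpa using h

-- pvRank facts
theorem pvRank_append_of_fail (low : String) (xs ys : List String) (n : Nat)
    (h : ∀ e ∈ xs, PySem.Str.endswith low e = false) :
    pvRank low (xs ++ ys) n = pvRank low ys (n + xs.length) := by
  induction xs generalizing n with
  | nil => simp [pvRank]
  | cons e xs' ih =>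
    have he : PySem.Str.endswith low e = false := h e (by simp)
    simp only [List.cons_append, pvRank, he, Bool.false_eq_true, if_false]
    rw [ih (n + 1) (fun e' he' => h e' (List.mem_cons_of_mem _ he'))]
    have harith : n + 1 + xs'.length = n + (e :: xs').length := by simp; omega
    rw [harith]

theorem pvRank_ge (low : String) : ∀ (ys : List String) (n m : Nat),
    pvRank low ys n = some m → n ≤ m := by
  intro ys
  induction ys with
  | nil => intro n m h; simp [pvRank] at h
  | cons e ys' ih =>
    intro n m h
    by_cases he : PySem.Str.endswith low e = true
    · unfold pvRank at h
      rw [if_pos he] at h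
      injection h with h'
      omega
    · unfold pvRank at h
      rw [if_neg he] at h
      have := ih (n + 1) m h
      omega

-- filter decomposition
theorem pvFilter_split {f : String → Bool} :
    ∀ (l c1 c2 : List String) (q : String), l.filter f = c1 ++ q :: c2 →
      ∃ u1 u2, l = u1 ++ q :: u2 ∧ u1.filter f = c1 ∧ u2.filter f = c2 ∧ f q = true := by
  intro l
  induction l with
  | nil => intro c1 c2 q h; simp at h
  | cons x t ih =>
    intro c1 c2 q h
    by_cases hx : f x = true
    · rw [List.filter_cons_of_pos hx] at h
      cases c1 with
      | nil =>
        simp at h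
        exact ⟨[], t, by simp [h.1], rfl, h.2, h.1 ▸ hx⟩
      | cons c c1' =>
        have hc : x = c ∧ t.filter f = c1' ++ q :: c2 := by
          have := h; simp at this; exact this
        obtain ⟨u1, u2, hdec, h1, h2, hq⟩ := ih c1' c2 q hc.2
        exact ⟨x :: u1, u2, by simp [hdec], by rw [List.filter_cons_of_pos hx, h1, hc.1], h2, hq⟩
    · rw [List.filter_cons_of_neg (by simpa using hx)] at h
      obtain ⟨u1, u2, hdec, h1, h2, hq⟩ := ih c1 c2 q h
      exact ⟨x :: u1, u2, by simp [hdec], by rw [List.filter_cons_of_neg (by simpa using hx), h1], h2, hq⟩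

-- order facts for the two lexicographic keys
theorem pvKeyLt_asym (a b : Nat × Nat × Int) (h : pvKeyLt a b = true) : pvKeyLt b a = false := by
  simp [pvKeyLt] at *; omega

theorem pvKeyLt_tr (a b c : Nat × Nat × Int) (h1 : pvKeyLt a b = true) (h2 : pvKeyLt c b = false) :
    pvKeyLt a c = true := by
  simp [pvKeyLt] at *; omega

theorem pvKeyLt2_asym (a b : Nat × Int) (h : pvKeyLt2 a b = true) : pvKeyLt2 b a = false := by
  simp [pvKeyLt2] at *; omega

theorem pvKeyLt2_tr (a b c : Nat × Int) (h1 : pvKeyLt2 a b = true) (h2 : pvKeyLt2 c b = false) :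
    pvKeyLt2 a c = true := by
  simp [pvKeyLt2] at *; omega

theorem pvKeyLt_rank_lt (r rp a1 b1 : Nat) (a2 b2 : Int) (h : r < rp) :
    pvKeyLt (r, a1, a2) (rp, b1, b2) = true := by
  simp [pvKeyLt]; omega

theorem pvKeyLt_rank_gt (r rp a1 b1 : Nat) (a2 b2 : Int) (h : r < rp) :
    pvKeyLt (rp, a1, a2) (r, b1, b2) = false := by
  simp [pvKeyLt]; omega

theorem pvKeyLt_rank_eq (r a1 b1 : Nat) (a2 b2 : Int) :
    pvKeyLt (r, a1, a2) (r, b1, b2) = pvKeyLt2 (a1, a2) (b1, b2) := by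
  rw [Bool.eq_iff_iff]; simp [pvKeyLt, pvKeyLt2]; omega

theorem pvRank_some_match (low : String) : ∀ (ys : List String) (n m : Nat),
    pvRank low ys n = some m → ∃ e ∈ ys, PySem.Str.endswith low e = true := by
  intro ys
  induction ys with
  | nil => intro n m h; simp [pvRank] at h
  | cons e ys' ih =>
    intro n m h
    by_cases he : PySem.Str.endswith low e = true
    · exact ⟨e, by simp, he⟩
    · unfold pvRank at h
      rw [if_neg he] at h
      obtain ⟨e', he', hm⟩ := ih (n + 1) m h
      exact ⟨e', by simp [he'], hm⟩

-- A's extension loop: either no extension matches anything, or A stops at the first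
-- extension with candidates
theorem pvPickLoop_spec (files : List String) : ∀ exts : List String,
    (pvPickLoop files exts = none ∧ ∀ e ∈ exts, pvCand files e = []) ∨
    (∃ exts1 e1 exts2, exts = exts1 ++ e1 :: exts2 ∧ (∀ e ∈ exts1, pvCand files e = []) ∧
      pvCand files e1 ≠ [] ∧
      pvPickLoop files exts =
        (PySem.List.sorted2 (pvCand files e1) (fun p => PySem.Str.count p "/")
          (fun p => PySem.Str.len p) false).head?) := by
  intro exts
  induction exts with
  | nil => left; exact ⟨rfl, by simp⟩
  | cons e rest ih =>
    by_cases hc : pvCand files e = []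
    · have hstep : pvPickLoop files (e :: rest) = pvPickLoop files rest := by
        simp [pvPickLoop, hc]
      rcases ih with ⟨hn, hall⟩ | ⟨e1s, e1, e2s, hdec, hall, hne, hval⟩
      · left
        refine ⟨by rw [hstep]; exact hn, ?_⟩
        intro x hx; rcases List.mem_cons.mp hx with hx | hx
        · subst hx; exact hc
        · exact hall x hx
      · right
        refine ⟨e :: e1s, e1, e2s, by rw [hdec]; rfl, ?_, hne, by rw [hstep]; exact hval⟩
        intro x hx; rcases List.mem_cons.mp hx with hx | hx
        · subst hx; exact hc
        · exact hall x hx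
    · right
      refine ⟨[], e, rest, rfl, by simp, hc, ?_⟩
      simp [pvPickLoop, hc]

-- the concrete priority list
theorem pvRank_at_split (files exts1 : List String) (e1 : String) (exts2 : List String)
    (hE : [".pt", ".onnx", ".engine", ".tflite"] = exts1 ++ e1 :: exts2)
    (hempty : ∀ e ∈ exts1, pvCand files e = [])
    (p : String) (hp : p ∈ files) :
    pvRank (PySem.Str.lower p) [".pt", ".onnx", ".engine", ".tflite"] 0 =
      pvRank (PySem.Str.lower p) (e1 :: exts2) exts1.length := by
  have hctx : ∀ e ∈ exts1, PySem.Str.endswith (PySem.Str.lower p) e = false := by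
    intro e he
    have h0 := hempty e he
    unfold pvCand at h0
    have := List.filter_eq_nil_iff.mp h0 p hp
    simpa using this
  rw [hE, pvRank_append_of_fail _ _ _ _ hctx]
  simp

-- key of a file matching the chosen extension
theorem pvKeyB_of_match (files exts1 : List String) (e1 : String) (exts2 : List String)
    (hE : [".pt", ".onnx", ".engine", ".tflite"] = exts1 ++ e1 :: exts2)
    (hempty : ∀ e ∈ exts1, pvCand files e = [])
    (p : String) (hp : p ∈ files)
    (hm : PySem.Str.endswith (PySem.Str.lower p) e1 = true) :
    pvKeyB p = some (exts1.length, PySem.Str.count p "/", PySem.Str.len p) := by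
  unfold pvKeyB
  rw [pvRank_at_split files exts1 e1 exts2 hE hempty p hp]
  unfold pvRank
  rw [if_pos hm]
  rfl

-- key of a file NOT matching the chosen extension has a strictly larger rank
theorem pvKeyB_of_not_match (files exts1 : List String) (e1 : String) (exts2 : List String)
    (hE : [".pt", ".onnx", ".engine", ".tflite"] = exts1 ++ e1 :: exts2)
    (hempty : ∀ e ∈ exts1, pvCand files e = [])
    (p : String) (hp : p ∈ files)
    (hm : ¬ PySem.Str.endswith (PySem.Str.lower p) e1 = true)
    (kp : Nat × Nat × Int) (hkp : pvKeyB p = some kp) :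
    exts1.length < kp.1 := by
  unfold pvKeyB at hkp
  rw [pvRank_at_split files exts1 e1 exts2 hE hempty p hp] at hkp
  unfold pvRank at hkp
  rw [if_neg hm] at hkp
  cases hr : pvRank (PySem.Str.lower p) exts2 (exts1.length + 1) with
  | none => rw [hr] at hkp; simp at hkp
  | some m =>
    rw [hr] at hkp
    have h2 : (m, PySem.Str.count p "/", PySem.Str.len p) = kp := by simpa using hkp
    have hge := pvRank_ge (PySem.Str.lower p) exts2 (exts1.length + 1) m hr
    rw [← h2]
    show exts1.length < m
    omega

-- transfer: the first (slashes, length)-minimum of the chosen candidates is the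
-- first (rank, slashes, length)-minimum of the whole file list
theorem pvTransfer (files exts1 : List String) (e1 : String) (exts2 : List String)
    (hE : [".pt", ".onnx", ".engine", ".tflite"] = exts1 ++ e1 :: exts2)
    (hempty : ∀ e ∈ exts1, pvCand files e = [])
    (qA : String) (k2 : Nat × Int)
    (hmin : pvIsFirstMin pvKey2 pvKeyLt2 (pvCand files e1) qA k2) :
    pvIsFirstMin pvKeyB pvKeyLt files qA (exts1.length, k2.1, k2.2) := by
  obtain ⟨c1, c2, hc, hkqA, hb, ha⟩ := hmin
  have hk2 : k2 = (PySem.Str.count qA "/", PySem.Str.len qA) := by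
    unfold pvKey2 at hkqA; injection hkqA with e; exact e.symm
  unfold pvCand at hc
  obtain ⟨u1, u2, hdec, hf1, hf2, hfq⟩ := pvFilter_split files c1 c2 qA hc
  have hqmem : qA ∈ files := by rw [hdec]; simp
  refine ⟨u1, u2, hdec, ?_, ?_, ?_⟩
  · rw [pvKeyB_of_match files exts1 e1 exts2 hE hempty qA hqmem hfq, hk2]
  · intro p hp kp hkp
    have hpf : p ∈ files := by rw [hdec]; exact List.mem_append_left _ hp
    by_cases hm : PySem.Str.endswith (PySem.Str.lower p) e1 = true
    · have hkey := pvKeyB_of_match files exts1 e1 exts2 hE hempty p hpf hm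
      rw [hkey] at hkp
      injection hkp with e; subst e
      have hpc1 : p ∈ c1 := by rw [← hf1]; exact List.mem_filter.mpr ⟨hp, hm⟩
      have hbp := hb p hpc1 (PySem.Str.count p "/", PySem.Str.len p) rfl
      rw [show (exts1.length, k2.1, k2.2) = (exts1.length, (k2.1 : Nat), (k2.2 : Int)) from rfl,
        pvKeyLt_rank_eq exts1.length k2.1 (PySem.Str.count p "/") k2.2 (PySem.Str.len p)]
      simpa using hbp
    · have := pvKeyB_of_not_match files exts1 e1 exts2 hE hempty p hpf hm kp hkp
      obtain ⟨r1, r2, r3⟩ := kp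
      exact pvKeyLt_rank_lt exts1.length r1 k2.1 r2 k2.2 r3 this
  · intro p hp kp hkp
    have hpf : p ∈ files := by rw [hdec]; exact List.mem_append_right _ (List.mem_cons_of_mem _ hp)
    by_cases hm : PySem.Str.endswith (PySem.Str.lower p) e1 = true
    · have hkey := pvKeyB_of_match files exts1 e1 exts2 hE hempty p hpf hm
      rw [hkey] at hkp
      injection hkp with e; subst e
      have hpc2 : p ∈ c2 := by rw [← hf2]; exact List.mem_filter.mpr ⟨hp, hm⟩
      have hap := ha p hpc2 (PySem.Str.count p "/", PySem.Str.len p) rfl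
      rw [pvKeyLt_rank_eq exts1.length (PySem.Str.count p "/") k2.1 (PySem.Str.len p) k2.2]
      simpa using hap
    · have := pvKeyB_of_not_match files exts1 e1 exts2 hE hempty p hpf hm kp hkp
      obtain ⟨r1, r2, r3⟩ := kp
      exact pvKeyLt_rank_gt exts1.length r1 r2 k2.1 r3 k2.2 this

theorem pick_weight_file_py_spec : Claim_equal_pick_weight_file_py := by
  intro files _
  show pick_weight_file_py files = pick_weight_file_py_alt files
  unfold pick_weight_file_py pick_weight_file_py_alt
  have hmap : files.map (fun p => p) = files := List.map_id' files
  rw [hmap]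
  have hstep : pvStep = pvFM pvKeyB pvKeyLt := funext fun b => funext fun p => pvStep_eq b p
  rw [hstep]
  rcases pvFM_foldl_none pvKeyB pvKeyLt pvKeyLt_asym pvKeyLt_tr files with
    ⟨hB, hallnone⟩ | ⟨q, k, hB, hmin⟩
  · -- B returns none: no file matches any extension, so A returns none too
    rw [hB]
    rcases pvPickLoop_spec files [".pt", ".onnx", ".engine", ".tflite"] with
      ⟨hA, _⟩ | ⟨exts1, e1, exts2, hE, hempty, hne, hval⟩
    · rw [hA]; rfl
    · exfalso
      obtain ⟨p, hp⟩ := List.exists_mem_of_ne_nil _ hne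
      have hpf : p ∈ files := (List.mem_filter.mp hp).1
      have hpm : PySem.Str.endswith (PySem.Str.lower p) e1 = true := (List.mem_filter.mp hp).2
      have := pvKeyB_of_match files exts1 e1 exts2 hE hempty p hpf hpm
      rw [hallnone p hpf] at this
      cases this
  · -- B returns some q: A stops at some extension and returns the same q
    rw [hB]
    rcases pvPickLoop_spec files [".pt", ".onnx", ".engine", ".tflite"] with
      ⟨hA, hallempty⟩ | ⟨exts1, e1, exts2, hE, hempty, hne, hval⟩
    · exfalso
      obtain ⟨l1, l2, hdec, hkq, _, _⟩ := hmin
      have hqf : q ∈ files := by rw [hdec]; simp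
      unfold pvKeyB at hkq
      cases hr : pvRank (PySem.Str.lower q) [".pt", ".onnx", ".engine", ".tflite"] 0 with
      | none => rw [hr] at hkq; cases hkq
      | some m =>
        obtain ⟨e, he, hm⟩ := pvRank_some_match _ _ _ _ hr
        have h0 := hallempty e he
        unfold pvCand at h0
        have := List.filter_eq_nil_iff.mp h0 q hqf
        simp at hm this
        rw [hm] at this
        cases this
    · rw [hval, pvHead_sorted2]
      rcases pvFM_foldl_none pvKey2 pvKeyLt2 pvKeyLt2_asym pvKeyLt2_tr (pvCand files e1) with
        ⟨_, hall2⟩ | ⟨qA, kA, hA2, hminA⟩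
      · exfalso
        obtain ⟨p, hp⟩ := List.exists_mem_of_ne_nil _ hne
        have := hall2 p hp
        unfold pvKey2 at this
        cases this
      · rw [hA2]
        have htrans := pvTransfer files exts1 e1 exts2 hE hempty qA kA hminA
        have := pvIsFirstMin_unique pvKeyB pvKeyLt files qA q
          (exts1.length, kA.1, kA.2) k htrans hmin
        rw [this]
        rfl
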